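-- pv_equiv track=rewrite | github.com/ALTA-DE1-iwang-24Feb2000/Basic-Programming-Part4 | problem2/main.py | draw_xyz
-- ===== SOURCE A (Python) =====
-- def draw_xyz(N):
--     pattern = ""
--     angka = 1
--     for i in range(1, N+1 ):
--         for j in range (1, N+1 ):
--             if angka %3 == 0:
--                pattern += 'X' + " "
--             elif angka %2 == 0 :
--                 pattern += 'Z' + " "
--             else:
--                 pattern += 'Y' + " "
--             angka += 1
--         pattern += '\n'
--
--     if angka > N:
--         angka = 1
--     return pattern
-- ===== SOURCE B (Python) =====
-- def draw_xyz(N):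
--     if N <= 0:
--         return ""
--     tile = "Y Z X Z Y X "  # one full period of the cell cycle (cells 1..6)
--     flat = (tile * (N * N // 6 + 1))[:2 * N * N]
--     return "".join(flat[2 * r * N:2 * (r + 1) * N] + "\n" for r in range(N))
-- ===== Notes on version B (the rewrite author's own statement) =====
-- stated objective: faster
-- what changed: Replaces A's nested row/column loops with a per-cell running counter by repeating the period-6 tile string 'Y Z X Z Y X ' to build the whole flat band at once and slicing it into the N rows.
import Mathlib
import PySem

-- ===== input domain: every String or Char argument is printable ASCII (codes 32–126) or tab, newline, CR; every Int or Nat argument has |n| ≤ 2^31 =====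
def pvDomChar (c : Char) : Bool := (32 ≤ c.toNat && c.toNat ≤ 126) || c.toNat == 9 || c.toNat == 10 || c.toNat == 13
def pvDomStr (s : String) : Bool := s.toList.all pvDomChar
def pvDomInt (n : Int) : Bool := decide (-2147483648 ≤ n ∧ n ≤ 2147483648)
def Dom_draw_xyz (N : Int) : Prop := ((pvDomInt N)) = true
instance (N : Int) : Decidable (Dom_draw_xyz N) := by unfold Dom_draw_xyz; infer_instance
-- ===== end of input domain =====

-- B replaces A's nested loops with a running counter by repeating the period-6 tile "Y Z X Z Y X " and slicing it into rows (faster constant factor).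

-- ===== PORT A =====
-- inner-loop body of A: one cell appended, counter bumped
def pvStepA (st : List Char × Int) (_j : Int) : List Char × Int :=
  if PySem.Int.mod st.2 3 = 0 then (st.1 ++ ['X', ' '], st.2 + 1)
  else if PySem.Int.mod st.2 2 = 0 then (st.1 ++ ['Z', ' '], st.2 + 1)
  else (st.1 ++ ['Y', ' '], st.2 + 1)

def draw_xyz (N : Int) : String :=
  let st := (PySem.List.pyRange 1 (N + 1) 1).foldl
    (fun st _i =>
      let st2 := (PySem.List.pyRange 1 (N + 1) 1).foldl pvStepA st
      (st2.1 ++ ['\n'], st2.2))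
    ([], 1)
  -- Python's trailing 'if angka > N: angka = 1' only reassigns a dead local; it never affects the return
  String.ofList st.1

-- ===== PORT B =====
def draw_xyz_alt (N : Int) : String :=
  if N ≤ 0 then ""
  else
    -- flat = (tile * (N*N//6 + 1))[:2*N*N] with tile = "Y Z X Z Y X "; the repetition count is positive here, so .toNat is exact
    String.ofList (((PySem.List.pyRange 0 N 1).map
      (fun r => PySem.List.slice
        (PySem.List.slice
          ((List.replicate (PySem.Int.floordiv (N * N) 6 + 1).toNat
            (['Y', ' ', 'Z', ' ', 'X', ' ', 'Z', ' ', 'Y', ' ', 'X', ' '] : List Char)).flatten)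
          none (some (2 * N * N)))
        (some (2 * r * N)) (some (2 * (r + 1) * N)) ++ ['\n'])).flatten)

-- ===== PRECONDITION & SPEC =====
def Spec_draw_xyz (N : Int) (out : String) : Prop := out = draw_xyz_alt N
instance (N : Int) (out : String) : Decidable (Spec_draw_xyz N out) := by unfold Spec_draw_xyz; infer_instance

-- ===== CLAIM (what is proved, stated in full; the proofs are below) =====
def Claim_equal_draw_xyz : Prop := ∀ (N : Int), Dom_draw_xyz N → Spec_draw_xyz N (draw_xyz N)

-- ===== LEMMAS AND PROOFS =====

-- the cell A appends when the counter is k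
def pvCellA (k : Int) : List Char :=
  if PySem.Int.mod k 3 = 0 then ['X', ' ']
  else if PySem.Int.mod k 2 = 0 then ['Z', ' ']
  else ['Y', ' ']

def pvRowA : Int → Nat → List Char
  | _, 0 => []
  | a, n + 1 => pvCellA a ++ pvRowA (a + 1) n

def pvGridA : Int → Nat → Nat → List Char
  | _, 0, _ => []
  | a, m + 1, n => pvRowA a n ++ '\n' :: pvGridA (a + n) m n

-- the cell of B's flat band at 0-based position p
def pvCellB (p : Int) : List Char :=
  ((PySem.List.pyGet? (['Y', 'Z', 'X', 'Z', 'Y', 'X'] : List Char) (PySem.Int.mod p 6)).getD ' ') :: [' ']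

def pvRowB (j n : Nat) : List Char := ((List.range' j n).map (fun k : Nat => pvCellB (k : Int))).flatten

theorem pvStepA_eq (st : List Char × Int) (j : Int) :
    pvStepA st j = (st.1 ++ pvCellA st.2, st.2 + 1) := by
  unfold pvStepA pvCellA; split_ifs <;> simp

theorem pvInnerA (L : List Int) : ∀ (s : List Char) (a : Int),
    L.foldl pvStepA (s, a) = (s ++ pvRowA a L.length, a + L.length) := by
  induction L with
  | nil => intro s a; simp [pvRowA]
  | cons x xs ih =>
    intro s a
    simp only [List.foldl_cons, pvStepA_eq, List.length_cons, pvRowA, ih, Prod.mk.injEq]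
    constructor
    · simp
    · push_cast; ring

theorem pvOuterA (LI : List Int) (L : List Int) : ∀ (s : List Char) (a : Int),
    L.foldl (fun st (_i : Int) =>
      let st2 := LI.foldl pvStepA st
      (st2.1 ++ ['\n'], st2.2)) (s, a)
    = (s ++ pvGridA a L.length LI.length, a + L.length * LI.length) := by
  induction L with
  | nil => intro s a; simp [pvGridA]
  | cons x xs ih =>
    intro s a
    simp only [List.foldl_cons, pvInnerA, List.length_cons, pvGridA, ih, Prod.mk.injEq]
    constructor
    · simp
    · push_cast; ring

-- B's cell at position p is A's cell at counter p+1
theorem pvCell_eq (p : Int) (_hp : 0 ≤ p) : pvCellB p = pvCellA (p + 1) := by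
  unfold pvCellB pvCellA
  rw [PySem.Int.mod_eq_emod_of_pos (show (0:Int) < 6 by omega),
      PySem.Int.mod_eq_emod_of_pos (show (0:Int) < 3 by omega),
      PySem.Int.mod_eq_emod_of_pos (show (0:Int) < 2 by omega)]
  have h6 : p % 6 = 0 ∨ p % 6 = 1 ∨ p % 6 = 2 ∨ p % 6 = 3 ∨ p % 6 = 4 ∨ p % 6 = 5 := by omega
  rcases h6 with h | h | h | h | h | h <;>
    · have h3 : (p + 1) % 3 = (p % 6 + 1) % 3 := by omega
      have h2 : (p + 1) % 2 = (p % 6 + 1) % 2 := by omega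
      rw [h3, h2, h]
      decide

theorem pvRowB_eq (n : Nat) : ∀ (j : Nat), pvRowB j n = pvRowA ((j : Int) + 1) n := by
  induction n with
  | zero => intro j; simp [pvRowB, pvRowA]
  | succ n ih =>
    intro j
    have : pvRowB j (n + 1) = pvCellB (j : Int) ++ pvRowB (j + 1) n := by
      simp [pvRowB, List.range'_succ]
    rw [this, pvCell_eq (j : Int) (by positivity), ih (j + 1), pvRowA]
    push_cast; ring_nf

theorem pvRowB_append (j m1 m2 : Nat) : pvRowB j (m1 + m2) = pvRowB j m1 ++ pvRowB (j + m1) m2 := by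
  unfold pvRowB
  have h := List.range'_append (s := j) (m := m1) (n := m2) (step := 1)
  rw [Nat.one_mul] at h
  rw [← h, List.map_append, List.flatten_append]

theorem pvRowB_length (n : Nat) : ∀ (j : Nat), (pvRowB j n).length = 2 * n := by
  induction n with
  | zero => intro j; simp [pvRowB]
  | succ n ih =>
    intro j
    have : pvRowB j (n + 1) = pvCellB (j : Int) ++ pvRowB (j + 1) n := by
      simp [pvRowB, List.range'_succ]
    rw [this]
    simp [pvCellB, ih (j + 1)]
    omega

theorem pvRowB_take (j m d : Nat) : (pvRowB j (m + d)).take (2 * m) = pvRowB j m := by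
  rw [pvRowB_append, List.take_left' (pvRowB_length m j)]

theorem pvRowB_drop (j m d : Nat) : (pvRowB j (m + d)).drop (2 * m) = pvRowB (j + m) d := by
  rw [pvRowB_append, List.drop_left' (pvRowB_length m j)]

-- one tile is the six cells of a full period, wherever a period starts
theorem pvTile_block (j : Nat) :
    pvRowB (6 * j) 6 = (['Y', ' ', 'Z', ' ', 'X', ' ', 'Z', ' ', 'Y', ' ', 'X', ' '] : List Char) := by
  have e : ∀ i : Nat, i < 6 → pvCellB ((6 * j + i : Nat) : Int) = pvCellB ((i : Nat) : Int) := by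
    intro i hi
    unfold pvCellB
    rw [show PySem.Int.mod ((6 * j + i : Nat) : Int) 6 = PySem.Int.mod ((i : Nat) : Int) 6 from by
      rw [PySem.Int.mod_eq_emod_of_pos (show (0:Int) < 6 by omega),
          PySem.Int.mod_eq_emod_of_pos (show (0:Int) < 6 by omega)]
      push_cast; omega]
  unfold pvRowB
  rw [List.range'_eq_map_range, List.map_map]
  have hmap : (List.range 6).map ((fun k : Nat => pvCellB (k : Int)) ∘ (fun x => 6 * j + x))
      = (List.range 6).map (fun k : Nat => pvCellB (k : Int)) := by
    apply List.map_congr_left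
    intro i hi
    exact e i (List.mem_range.mp hi)
  rw [hmap]
  rfl

theorem pvReplicate_eq (K : Nat) : ∀ (j : Nat),
    (List.replicate K (['Y', ' ', 'Z', ' ', 'X', ' ', 'Z', ' ', 'Y', ' ', 'X', ' '] : List Char)).flatten
    = pvRowB (6 * j) (6 * K) := by
  induction K with
  | zero => intro j; simp [pvRowB]
  | succ K ih =>
    intro j
    rw [List.replicate_succ, List.flatten_cons,
        show 6 * (K + 1) = 6 + 6 * K from by ring,
        pvRowB_append (6 * j) 6 (6 * K), pvTile_block j,
        show 6 * j + 6 = 6 * (j + 1) from by ring, ← ih (j + 1)]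

theorem pvGridB_eq (n : Nat) : ∀ (m s : Nat),
    ((List.range' s m).map (fun r => pvRowA ((r * n : Nat) + 1) n ++ ['\n'])).flatten
    = pvGridA ((s * n : Nat) + 1) m n := by
  intro m
  induction m with
  | zero => intro s; simp [pvGridA]
  | succ m ih =>
    intro s
    rw [List.range'_succ]
    simp only [List.map_cons, List.flatten_cons, ih (s + 1), pvGridA]
    have hc : ((s * n : Nat) : Int) + 1 + n = (((s + 1) * n : Nat) : Int) + 1 := by push_cast; ring
    rw [hc, List.append_assoc]
    simp

theorem draw_xyz_eq_grid (N : Int) (_hN : 0 < N) :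
    draw_xyz N = String.ofList (pvGridA 1 N.toNat N.toNat) := by
  unfold draw_xyz
  rw [pvOuterA]
  simp [PySem.List.length_pyRange_one]

theorem draw_xyz_alt_eq_grid (N : Int) (hN : 0 < N) :
    draw_xyz_alt N = String.ofList (pvGridA 1 N.toNat N.toNat) := by
  unfold draw_xyz_alt
  rw [if_neg (by omega)]
  set n := N.toNat with hn
  have hNn : N = (n : Int) := by omega
  set K := (PySem.Int.floordiv (N * N) 6 + 1).toNat with hK
  have hNN : N * N = ((n * n : Nat) : Int) := by rw [hNn]; push_cast; ring
  have hKval : K = (((n * n : Nat) : Int) / 6 + 1).toNat := by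
    rw [hK, PySem.Int.floordiv_eq_ediv_of_pos (show (0:Int) < 6 by omega), hNN]
  have hKle : n * n ≤ 6 * K := by omega
  -- the truncated band of tiles is the first n*n cells
  have hflat : PySem.List.slice
      ((List.replicate K (['Y', ' ', 'Z', ' ', 'X', ' ', 'Z', ' ', 'Y', ' ', 'X', ' '] : List Char)).flatten)
      none (some (2 * N * N)) = pvRowB 0 (n * n) := by
    rw [pvReplicate_eq K 0, show (6 * 0 : Nat) = 0 from rfl,
        PySem.List.slice_to _ (show (0:Int) ≤ 2 * N * N by nlinarith)]
    have h2 : 2 * N * N = ((2 * (n * n) : Nat) : Int) := by rw [hNn]; push_cast; ring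
    rw [h2, Int.toNat_natCast,
        show 6 * K = n * n + (6 * K - n * n) from by omega, pvRowB_take]
  rw [hflat]
  have hrows : (PySem.List.pyRange 0 N 1) = (List.range n).map (fun k : Nat => (k : Int)) := by
    rw [PySem.List.pyRange_one, show (N - 0).toNat = n from by omega]
    exact List.map_congr_left (fun k _ => by simp)
  rw [hrows, List.map_map]
  have hrow : ∀ r : Nat, r < n →
      PySem.List.slice (pvRowB 0 (n * n)) (some (2 * (r : Int) * N)) (some (2 * ((r : Int) + 1) * N)) ++ ['\n']
      = pvRowA ((r * n : Nat) + 1) n ++ ['\n'] := by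
    intro r hr
    have hle : r * n + n ≤ n * n := by
      have h : (r + 1) * n ≤ n * n := Nat.mul_le_mul_right n hr
      rw [Nat.add_mul, Nat.one_mul] at h
      omega
    have h1 : 2 * (r : Int) * N = ((2 * (r * n) : Nat) : Int) := by rw [hNn]; push_cast; ring
    have h2 : 2 * ((r : Int) + 1) * N = ((2 * (r * n) : Nat) : Int) + ((2 * n : Nat) : Int) := by
      rw [hNn]; push_cast; ring
    rw [h1, h2, PySem.List.slice_natCast_add,
        show n * n = r * n + (n * n - r * n) from by omega,
        pvRowB_drop,
        show (0 : Nat) + r * n = r * n from by omega,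
        show n * n - r * n = n + (n * n - r * n - n) from by omega,
        pvRowB_take, pvRowB_eq]
  have hmap : (List.range n).map
      ((fun r => PySem.List.slice (pvRowB 0 (n * n)) (some (2 * r * N)) (some (2 * (r + 1) * N)) ++ ['\n'])
        ∘ (fun k : Nat => (k : Int)))
      = (List.range n).map (fun r => pvRowA ((r * n : Nat) + 1) n ++ ['\n']) := by
    apply List.map_congr_left
    intro r hrm
    exact hrow r (List.mem_range.mp hrm)
  rw [hmap, List.range_eq_range', pvGridB_eq n n 0]
  simp

-- ===== VERDICT (by name: the statement is the Claim_ definition above) =====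
theorem draw_xyz_spec : Claim_equal_draw_xyz := by
  intro N _
  unfold Spec_draw_xyz
  by_cases hN : N ≤ 0
  · unfold draw_xyz draw_xyz_alt
    rw [if_pos hN, PySem.List.pyRange_one_eq_nil (by omega)]
    decide
  · rw [draw_xyz_eq_grid N (by omega), draw_xyz_alt_eq_grid N (by omega)]
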